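-- pv_equiv track=rewrite | github.com/Anshuman-37/DSA_Practice | Heap/Question-17(Simple).py | min_cost_to_connect_ropes
-- ===== SOURCE A (Python) =====
-- import heapq
--
-- def min_cost_to_connect_ropes(ropes):
--     heapq.heapify(ropes)
--     min_cost = 0
--
--     while len(ropes) > 1:
--         shortest1 = heapq.heappop(ropes)
--         shortest2 = heapq.heappop(ropes)
--         current_cost = shortest1 + shortest2
--         min_cost += current_cost
--         heapq.heappush(ropes, current_cost)
--
--     return min_cost
-- ===== SOURCE B (Python) =====
-- def min_cost_to_connect_ropes(ropes):
--     # sort once, then repeatedly merge the two front (smallest) ropes, re-inserting the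
--     # sum at its sorted position found by a hand-written binary search (bisect_left)
--     rs = sorted(ropes)
--     min_cost = 0
--     while len(rs) > 1:
--         s = rs[0] + rs[1]
--         min_cost += s
--         del rs[:2]
--         lo, hi = 0, len(rs)
--         while lo < hi:
--             mid = (lo + hi) // 2
--             if rs[mid] < s:
--                 lo = mid + 1
--             else:
--                 hi = mid
--         rs.insert(lo, s)
--     return min_cost
-- ===== Notes on version B (the rewrite author's own statement) =====
-- stated objective: alternative
-- what changed: Replaces the binary heap with a sort-once strategy: sort the ropes ascending, repeatedly merge the two front (smallest) elements and re-insert their sum at its sorted position found by a hand-written bisect_left binary search.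
import Mathlib
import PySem

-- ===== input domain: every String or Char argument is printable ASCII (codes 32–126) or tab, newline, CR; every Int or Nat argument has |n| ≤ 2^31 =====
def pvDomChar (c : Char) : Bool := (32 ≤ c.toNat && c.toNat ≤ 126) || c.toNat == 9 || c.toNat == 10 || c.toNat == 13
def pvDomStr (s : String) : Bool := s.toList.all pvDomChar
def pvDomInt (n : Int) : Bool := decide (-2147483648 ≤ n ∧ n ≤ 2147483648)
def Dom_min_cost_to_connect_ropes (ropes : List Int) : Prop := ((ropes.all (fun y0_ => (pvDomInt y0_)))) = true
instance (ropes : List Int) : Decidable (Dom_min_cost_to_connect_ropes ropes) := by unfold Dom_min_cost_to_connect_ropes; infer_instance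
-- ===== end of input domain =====

-- B replaces A's binary heap by sort-once + binary-search (bisect_left) re-insertion of
-- merge sums (alternative data structure, same return value). A mutates its argument in
-- place (heapify/pop); the equivalence proved here is about the RETURN value only.


-- ===== PORT A =====
-- heapq is modeled by hand at the value level: the heap is the plain list of its elements;
-- `popMin` returns exactly what `heapq.heappop` returns (the minimum value; one occurrence
-- removed) and `heappush` appends; `heapify` reorders only. This is exact for the returned
-- `min_cost`, which depends only on the multiset of heap elements, never on heap layout.
def popMin : List Int → Option (Int × List Int)
  | [] => none
  | x :: xs =>
    match popMin xs with
    | none => some (x, [])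
    | some (m, ys) => if x ≤ m then some (x, xs) else some (m, x :: ys)

-- helper for the termination lemma below: popMin is none exactly on the empty list
theorem popMin_none : ∀ {l : List Int}, popMin l = none → l = [] := by
  intro l h
  cases l with
  | nil => rfl
  | cons y ys =>
    rw [popMin] at h
    cases hy : popMin ys with
    | none => rw [hy] at h; simp at h
    | some p => rw [hy] at h; obtain ⟨m', t'⟩ := p; dsimp at h; split at h <;> simp at h

-- termination lemma for goA (cited in its decreasing_by)
theorem popMin_length : ∀ {l : List Int} {m : Int} {t : List Int},
    popMin l = some (m, t) → t.length + 1 = l.length := by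
  intro l
  induction l with
  | nil => intro m t h; simp [popMin] at h
  | cons x xs ih =>
    intro m t h
    rw [popMin] at h
    cases hx : popMin xs with
    | none =>
      rw [hx] at h
      have hxs : xs = [] := popMin_none hx
      simp only [Option.some.injEq, Prod.mk.injEq] at h
      obtain ⟨rfl, rfl⟩ := h
      simp [hxs]
    | some p =>
      obtain ⟨m', ys⟩ := p
      rw [hx] at h; dsimp at h
      split at h <;> simp only [Option.some.injEq, Prod.mk.injEq] at h <;> obtain ⟨rfl, rfl⟩ := h
      · rfl
      · have := ih hx
        simp only [List.length_cons] at *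
        omega

-- the while-loop of A: pop the two smallest, add their sum to the cost, push the sum
def goA (h : List Int) (cost : Int) : Int :=
  if 1 < h.length then
    match hp1 : popMin h with
    | none => cost            -- unreachable: the heap is nonempty
    | some (s1, h1) =>
      match hp2 : popMin h1 with
      | none => cost          -- unreachable: the heap still has an element
      | some (s2, h2) => goA (h2 ++ [s1 + s2]) (cost + (s1 + s2))
  else cost
termination_by h.length
decreasing_by
  have e1 := popMin_length hp1
  have e2 := popMin_length hp2
  simp only [List.length_append, List.length_cons, List.length_nil]
  omega

def min_cost_to_connect_ropes (ropes : List Int) : Int := goA ropes 0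

-- ===== PORT B =====
-- the while-loop of B: merge the two front elements, re-insert the sum at the position
-- found by Source B's hand-written binary search, which is exactly bisect_left, ported as
-- PySem.List.bisectLeft; rs.insert(lo, s) is PySem.List.insert
def goB : List Int → Int → Int
  | a :: b :: rest, cost =>
      goB (PySem.List.insert rest (PySem.List.bisectLeft rest (a + b) : Int) (a + b))
          (cost + (a + b))
  | _, cost => cost
termination_by l _ => l.length
decreasing_by simp [PySem.List.length_insert]

def min_cost_to_connect_ropes_alt (ropes : List Int) : Int :=
  goB (PySem.List.sorted ropes (fun x => x) false) 0

-- ===== PRECONDITION & SPEC =====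
def Spec_min_cost_to_connect_ropes (ropes : List Int) (out : Int) : Prop := out = min_cost_to_connect_ropes_alt ropes
instance (ropes : List Int) (out : Int) : Decidable (Spec_min_cost_to_connect_ropes ropes out) := by unfold Spec_min_cost_to_connect_ropes; infer_instance

-- ===== CLAIM (what is proved, stated in full; the proofs are below) =====
def Claim_equal_min_cost_to_connect_ropes : Prop := ∀ (ropes : List Int), Dom_min_cost_to_connect_ropes ropes → Spec_min_cost_to_connect_ropes ropes (min_cost_to_connect_ropes ropes)

-- ===== LEMMAS AND PROOFS =====

theorem popMin_perm : ∀ {l : List Int} {m : Int} {t : List Int},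
    popMin l = some (m, t) → l.Perm (m :: t) := by
  intro l
  induction l with
  | nil => intro m t h; simp [popMin] at h
  | cons x xs ih =>
    intro m t h
    rw [popMin] at h
    cases hx : popMin xs with
    | none =>
      have hxs : xs = [] := popMin_none hx
      rw [hx] at h
      simp only [Option.some.injEq, Prod.mk.injEq] at h
      obtain ⟨rfl, rfl⟩ := h
      simp [hxs]
    | some p =>
      obtain ⟨m', ys⟩ := p
      rw [hx] at h; dsimp at h
      split at h <;> simp only [Option.some.injEq, Prod.mk.injEq] at h <;> obtain ⟨rfl, rfl⟩ := h
      · exact List.Perm.refl _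
      · exact (List.Perm.cons x (ih hx)).trans (List.Perm.swap _ _ _)

theorem popMin_min : ∀ {l : List Int} {m : Int} {t : List Int},
    popMin l = some (m, t) → ∀ y ∈ l, m ≤ y := by
  intro l
  induction l with
  | nil => intro m t h; simp [popMin] at h
  | cons x xs ih =>
    intro m t h
    rw [popMin] at h
    cases hx : popMin xs with
    | none =>
      have hxs : xs = [] := popMin_none hx
      rw [hx] at h
      simp only [Option.some.injEq, Prod.mk.injEq] at h
      obtain ⟨rfl, rfl⟩ := h
      subst hxs
      intro y hy
      simp only [List.mem_singleton] at hy
      exact hy ▸ le_refl _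
    | some p =>
      obtain ⟨m', ys⟩ := p
      rw [hx] at h; dsimp at h
      split at h <;> simp only [Option.some.injEq, Prod.mk.injEq] at h <;> obtain ⟨rfl, rfl⟩ := h
      · rename_i hle
        intro y hy
        rcases List.mem_cons.mp hy with rfl | hy
        · exact le_refl _
        · exact hle.trans (ih hx y hy)
      · rename_i hnle
        intro y hy
        rcases List.mem_cons.mp hy with rfl | hy
        · exact (not_le.mp hnle).le
        · exact ih hx y hy

theorem popMin_sorted_perm {a : Int} {rs' l : List Int}
    (hp : l.Perm (a :: rs')) (hs : (a :: rs').Pairwise (· ≤ ·)) :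
    ∃ t, popMin l = some (a, t) ∧ t.Perm rs' := by
  cases hl : popMin l with
  | none =>
    have : l = [] := popMin_none hl
    subst this
    exact absurd hp.length_eq (by simp)
  | some p =>
    obtain ⟨m, t⟩ := p
    have hma : m ≤ a := popMin_min hl a (hp.symm.subset (List.mem_cons_self))
    have ham : a ≤ m := by
      have hmem : m ∈ a :: rs' := hp.subset ((popMin_perm hl).symm.subset (List.mem_cons_self))
      rcases List.mem_cons.mp hmem with rfl | hmem
      · exact le_refl _
      · exact (List.pairwise_cons.mp hs).1 m hmem
    have hma' : m = a := le_antisymm hma ham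
    subst hma'
    refine ⟨t, rfl, ?_⟩
    exact List.Perm.cons_inv ((popMin_perm hl).symm.trans hp)

-- sorted insertion at the bisect_left position: a permutation of s :: l, and sorted
theorem insertPos_sorted (s : Int) (l : List Int) (hs : l.Pairwise (· ≤ ·)) :
    (PySem.List.insert l (PySem.List.bisectLeft l s : Int) s).Pairwise (· ≤ ·) ∧
    (PySem.List.insert l (PySem.List.bisectLeft l s : Int) s).Perm (s :: l) := by
  obtain ⟨hle, hlt, hge⟩ := PySem.List.bisectLeft_spec l s hs
  rw [PySem.List.insert_natCast l _ s hle]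
  constructor
  · rw [List.pairwise_append]
    refine ⟨List.Pairwise.sublist (List.take_sublist _ _) hs, ?_, ?_⟩
    · rw [List.pairwise_cons]
      refine ⟨?_, List.Pairwise.sublist (List.drop_sublist _ _) hs⟩
      intro y hy
      obtain ⟨i, hi, rfl⟩ := List.mem_iff_getElem.mp hy
      rw [List.getElem_drop]
      exact hge _ _ (Nat.le_add_right _ _)
    · intro x hx y hy
      obtain ⟨j, hj, rfl⟩ := List.mem_iff_getElem.mp hx
      have hjlt : j < PySem.List.bisectLeft l s := by
        have := List.length_take_le (PySem.List.bisectLeft l s) l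
        have h2 : (l.take (PySem.List.bisectLeft l s)).length =
            min (PySem.List.bisectLeft l s) l.length := List.length_take ..
        omega
      have hxs : (l.take (PySem.List.bisectLeft l s))[j] < s := by
        rw [List.getElem_take]
        exact hlt j (by omega) hjlt
      rcases List.mem_cons.mp hy with rfl | hy2
      · exact hxs.le
      · obtain ⟨i, hi, rfl⟩ := List.mem_iff_getElem.mp hy2
        rw [List.getElem_drop]
        exact hxs.le.trans (hge _ _ (Nat.le_add_right _ _))
  · have hm := @List.perm_middle _ s (l.take (PySem.List.bisectLeft l s))
      (l.drop (PySem.List.bisectLeft l s))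
    simpa [List.take_append_drop] using hm

theorem goA_eq_goB : ∀ (n : ℕ) (h rs : List Int) (cost : Int),
    h.length = n → h.Perm rs → rs.Pairwise (· ≤ ·) → goA h cost = goB rs cost := by
  intro n
  induction n using Nat.strong_induction_on with
  | _ n ih =>
    intro h rs cost hlen hp hs
    cases rs with
    | nil =>
      have hh : h = [] := hp.eq_nil
      subst hh
      rw [goA]
      simp [goB]
    | cons a rs' =>
      cases rs' with
      | nil =>
        have hlen1 : h.length = 1 := by rw [hp.length_eq]; rfl
        rw [goA]
        simp [hlen1, goB]
      | cons b rest =>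
        obtain ⟨t1, hpop1, hperm1⟩ := popMin_sorted_perm hp hs
        have hs' : (b :: rest).Pairwise (· ≤ ·) := (List.pairwise_cons.mp hs).2
        obtain ⟨t2, hpop2, hperm2⟩ := popMin_sorted_perm hperm1 hs'
        have hlen2 : 1 < h.length := by rw [hp.length_eq]; simp
        rw [goA, if_pos hlen2]
        split
        · rename_i heq
          rw [hpop1] at heq
          exact absurd heq (by simp)
        · rename_i s1 h1 heq
          rw [hpop1] at heq
          simp only [Option.some.injEq, Prod.mk.injEq] at heq
          obtain ⟨rfl, rfl⟩ := heq
          split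
          · rename_i heq2
            rw [hpop2] at heq2
            exact absurd heq2 (by simp)
          · rename_i s2 h2 heq2
            rw [hpop2] at heq2
            simp only [Option.some.injEq, Prod.mk.injEq] at heq2
            obtain ⟨rfl, rfl⟩ := heq2
            have e1 := popMin_length hpop1
            have e2 := popMin_length hpop2
            conv_rhs => rw [goB]
            have hrest : rest.Pairwise (· ≤ ·) := (List.pairwise_cons.mp hs').2
            refine ih (t2 ++ [a + b]).length ?_ _ _ _ rfl ?_ ?_
            · simp only [List.length_append, List.length_singleton]
              omega
            · refine ((hperm2.append_right [a + b]).trans ?_).trans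
                (insertPos_sorted (a + b) rest hrest).2.symm
              exact List.perm_append_singleton _ _
            · exact (insertPos_sorted (a + b) rest hrest).1

-- ===== VERDICT (by name: the statement is the Claim_ definition above) =====
theorem min_cost_to_connect_ropes_spec : Claim_equal_min_cost_to_connect_ropes := by
  intro ropes _
  unfold Spec_min_cost_to_connect_ropes min_cost_to_connect_ropes min_cost_to_connect_ropes_alt
  exact goA_eq_goB ropes.length ropes _ 0 rfl
    (PySem.List.sorted_perm (xs := ropes) (key := fun x => x) (rev := false)).symm
    (PySem.List.sorted_pairwise (xs := ropes) (key := fun x => x))
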